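-- pv_equiv track=rewrite | github.com/lrei/legal-AI | app-public/app_public.py | format_article_title
-- ===== SOURCE A (Python) =====
-- def format_article_title(articles):
--     formatted_articles = []
--     for article in articles:
--         lines = article.split('\n')
--         if len(lines) >= 3:
--             # Make the third line (article title) bold
--             lines[2] = f"<strong>{lines[2]}</strong>"
--         formatted_articles.append('\n'.join(lines))
--     return formatted_articles
-- ===== SOURCE B (Python) =====
-- def _bold_third(s):
--     # single pass: count newlines, inject tags around the third line on the fly
--     parts = []
--     seen = 0
--     for ch in s:
--         if ch == '\n':
--             seen += 1
--             if seen == 2: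
--                 parts.append('\n<strong>')
--                 continue
--             if seen == 3:
--                 parts.append('</strong>\n')
--                 continue
--         parts.append(ch)
--     if seen == 2:
--         parts.append('</strong>')
--     return ''.join(parts)
--
--
-- def format_article_title(articles):
--     return [_bold_third(a) for a in articles]
-- ===== Notes on version B (the rewrite author's own statement) =====
-- stated objective: alternative
-- what changed: Replaced split('\n')/modify-index-2/join with a single left-to-right pass over the characters that counts newlines and injects the <strong>/</strong> tags on the fly (closing at end of string when the third line is last).
import Mathlib
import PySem

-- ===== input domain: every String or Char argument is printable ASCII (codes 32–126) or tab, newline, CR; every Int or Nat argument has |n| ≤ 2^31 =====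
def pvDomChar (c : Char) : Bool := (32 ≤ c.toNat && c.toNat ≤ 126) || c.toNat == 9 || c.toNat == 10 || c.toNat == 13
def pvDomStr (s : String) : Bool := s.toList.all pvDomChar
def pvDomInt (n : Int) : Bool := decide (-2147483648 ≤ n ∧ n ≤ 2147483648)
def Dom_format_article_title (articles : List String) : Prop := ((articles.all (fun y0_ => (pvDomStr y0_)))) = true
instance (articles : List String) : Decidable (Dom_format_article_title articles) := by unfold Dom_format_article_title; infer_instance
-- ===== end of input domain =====

-- B bolds the third line in one character pass (newline counter + tag injection) instead of A's split/modify/join; same cost, different structure.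

-- ===== PORT A =====
-- article.split('\n'); if len(lines) >= 3: lines[2] = "<strong>"+lines[2]+"</strong>"; '\n'.join(lines)
def pvFmtA (article : String) : String :=
  let lines := PySem.Chars.splitOn article.toList ['\n']
  let lines := if 3 ≤ lines.length
    then lines.set 2 ("<strong>".toList ++ lines.getD 2 [] ++ "</strong>".toList)
    else lines
  String.ofList (PySem.Chars.join ['\n'] lines)

def format_article_title (articles : List String) : List String :=
  articles.foldl (fun acc article => acc ++ [pvFmtA article]) []

-- ===== PORT B =====
-- the body of Source B's loop over the characters of s: (parts, seen) is the loop state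
def pvBoldStep (st : List (List Char) × Nat) (ch : Char) : List (List Char) × Nat :=
  if ch = '\n' then
    let seen := st.2 + 1
    if seen = 2 then (st.1 ++ ["\n<strong>".toList], seen)
    else if seen = 3 then (st.1 ++ ["</strong>\n".toList], seen)
    else (st.1 ++ [[ch]], seen)
  else (st.1 ++ [[ch]], st.2)

def pvBoldThird (s : String) : String :=
  let st := s.toList.foldl pvBoldStep ([], 0)
  let parts := if st.2 = 2 then st.1 ++ ["</strong>".toList] else st.1
  String.ofList (PySem.Chars.join [] parts)

def format_article_title_alt (articles : List String) : List String :=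
  articles.map pvBoldThird

-- ===== PRECONDITION & SPEC =====
def Spec_format_article_title (articles : List String) (out : List String) : Prop := out = format_article_title_alt articles
instance (articles : List String) (out : List String) : Decidable (Spec_format_article_title articles out) := by unfold Spec_format_article_title; infer_instance

-- ===== CLAIM (what is proved, stated in full; the proofs are below) =====
def Claim_equal_format_article_title : Prop := ∀ (articles : List String), Dom_format_article_title articles → Spec_format_article_title articles (format_article_title articles)

-- ===== LEMMAS AND PROOFS =====

-- prepend a chunk onto the first piece
def pvConsHead (p : List Char) : List (List Char) → List (List Char)
  | [] => [p]
  | x :: xs => (p ++ x) :: xs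

-- simple structural version of split on '\n'
def pvSplit : List Char → List (List Char)
  | [] => [[]]
  | c :: t => if c = '\n' then [] :: pvSplit t else pvConsHead [c] (pvSplit t)

lemma pvConsHead_consHead (p q : List Char) (X : List (List Char)) :
    pvConsHead p (pvConsHead q X) = pvConsHead (p ++ q) X := by
  cases X <;> simp [pvConsHead]

lemma pvSplit_ne_nil (cs : List Char) : pvSplit cs ≠ [] := by
  induction cs with
  | nil => simp [pvSplit]
  | cons c t ih =>
    by_cases h : c = '\n' <;> simp [pvSplit, h]
    cases hx : pvSplit t with
    | nil => exact absurd hx ih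
    | cons x xs => simp [pvConsHead]

lemma pvSplitOn_go_spec : ∀ (fuel : Nat) (l cur : List Char) (acc : List (List Char)),
    l.length < fuel →
    PySem.Chars.splitOn.go ['\n'] fuel l cur acc = acc.reverse ++ pvConsHead cur.reverse (pvSplit l) := by
  intro fuel
  induction fuel with
  | zero => intro l cur acc h; omega
  | succ f ih =>
    intro l cur acc h
    cases l with
    | nil => simp [PySem.Chars.splitOn.go, pvSplit, pvConsHead]
    | cons c t =>
      by_cases hc : c = '\n'
      · subst hc
        simp only [PySem.Chars.splitOn.go, List.isPrefixOf, pvSplit]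
        cases hx : pvSplit t with
        | nil => exact absurd hx (pvSplit_ne_nil t)
        | cons x xs =>
          simp [ih t [] (cur.reverse :: acc) (by simpa using h), pvConsHead, hx]
      · simp only [PySem.Chars.splitOn.go, pvSplit]
        have hp : List.isPrefixOf ['\n'] (c :: t) = false := by
          simp [List.isPrefixOf]
          intro hcc; exact hc hcc.symm
        rw [if_neg (by simp [hp])]
        rw [ih t (c :: cur) acc (by simpa using h)]
        simp [hc, pvConsHead_consHead]

lemma pvSplitOn_eq (cs : List Char) : PySem.Chars.splitOn cs ['\n'] = pvSplit cs := by
  have h := pvSplitOn_go_spec (cs.length + 1) cs [] [] (by omega)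
  cases hx : pvSplit cs with
  | nil => exact absurd hx (pvSplit_ne_nil cs)
  | cons x xs =>
    rw [hx] at h
    simpa [PySem.Chars.splitOn, pvConsHead, hx] using h

lemma pvJoin_pvSplit (cs : List Char) : PySem.Chars.join ['\n'] (pvSplit cs) = cs := by
  induction cs with
  | nil => simp [pvSplit, PySem.Chars.join_singleton]
  | cons c t ih =>
    by_cases h : c = '\n'
    · subst h
      cases hx : pvSplit t with
      | nil => exact absurd hx (pvSplit_ne_nil t)
      | cons x xs =>
        have hs : pvSplit ('\n' :: t) = [] :: x :: xs := by simp [pvSplit, hx]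
        rw [hs, PySem.Chars.join_cons_cons]
        rw [hx] at ih
        simp [ih]
    · simp only [pvSplit, if_neg h]
      cases hx : pvSplit t with
      | nil => exact absurd hx (pvSplit_ne_nil t)
      | cons x xs =>
        rw [hx] at ih
        cases xs with
        | nil =>
          simp only [pvConsHead, PySem.Chars.join_singleton] at *
          simp [ih]
        | cons y ys =>
          simp only [pvConsHead]
          rw [PySem.Chars.join_cons_cons] at ih ⊢
          simp [ih]

lemma pvSplit_no_nl (cs : List Char) : ∀ p ∈ pvSplit cs, '\n' ∉ p := by
  induction cs with
  | nil => simp [pvSplit]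
  | cons c t ih =>
    by_cases h : c = '\n'
    · subst h; simp [pvSplit]; exact ih
    · simp only [pvSplit, if_neg h]
      cases hx : pvSplit t with
      | nil => exact absurd hx (pvSplit_ne_nil t)
      | cons x xs =>
        rw [hx] at ih
        intro p hp
        simp only [pvConsHead, List.mem_cons] at hp
        rcases hp with hp | hp
        · subst hp
          simp only [List.mem_append, List.mem_singleton]
          rintro (hc | hc)
          · exact h hc.symm
          · exact ih x (by simp) hc
        · exact ih p (by simp [hp])

lemma pvSplit_length (cs : List Char) : (pvSplit cs).length = cs.count '\n' + 1 := by
  induction cs with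
  | nil => simp [pvSplit]
  | cons c t ih =>
    by_cases h : c = '\n'
    · subst h; simp [pvSplit, ih]
    · simp only [pvSplit, if_neg h]
      cases hx : pvSplit t with
      | nil => exact absurd hx (pvSplit_ne_nil t)
      | cons x xs =>
        rw [hx] at ih
        simp only [pvConsHead, List.length_cons, List.count_cons]
        simp only [List.length_cons] at ih
        simp [ih, h]

-- output chunks of B's loop given the newline count so far
def pvChunks : Nat → List Char → List (List Char)
  | _, [] => []
  | seen, c :: t =>
    if c = '\n' then
      (if seen + 1 = 2 then ["\n<strong>".toList]
       else if seen + 1 = 3 then ["</strong>\n".toList]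
       else [[c]]) ++ pvChunks (seen + 1) t
    else [[c]] ++ pvChunks seen t

lemma pvFoldl_step : ∀ (cs : List Char) (parts : List (List Char)) (seen : Nat),
    cs.foldl pvBoldStep (parts, seen) = (parts ++ pvChunks seen cs, seen + cs.count '\n') := by
  intro cs
  induction cs with
  | nil => intro parts seen; simp [pvChunks]
  | cons c t ih =>
    intro parts seen
    by_cases h : c = '\n'
    · subst h
      by_cases h2 : seen + 1 = 2
      · simp [pvBoldStep, pvChunks, h2, ih]; omega
      · by_cases h3 : seen + 1 = 3
        · simp [pvBoldStep, pvChunks, h3, ih]; omega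
        · simp [pvBoldStep, pvChunks, h2, h3, ih]; omega
    · simp [pvBoldStep, pvChunks, h, ih]

lemma pvJoin_nil_flatten (X : List (List Char)) : PySem.Chars.join [] X = X.flatten := by
  induction X with
  | nil => simp [PySem.Chars.join_nil]
  | cons x xs ih =>
    cases xs with
    | nil => simp [PySem.Chars.join_singleton]
    | cons y ys => rw [PySem.Chars.join_cons_cons]; simp at ih ⊢; simp [ih]

lemma pvChunks_nlfree : ∀ (p : List Char), '\n' ∉ p → ∀ (cs : List Char) (seen : Nat),
    (pvChunks seen (p ++ cs)).flatten = p ++ (pvChunks seen cs).flatten := by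
  intro p
  induction p with
  | nil => intro _ cs seen; simp
  | cons c t ih =>
    intro hn cs seen
    have hc : ¬ c = '\n' := fun h => hn (by simp [h])
    simp only [List.cons_append, pvChunks, if_neg hc]
    simp [ih (fun h => hn (by simp [h])) cs seen]

lemma pvChunks_high : ∀ (cs : List Char) (seen : Nat), 3 ≤ seen →
    (pvChunks seen cs).flatten = cs := by
  intro cs
  induction cs with
  | nil => intro seen _; simp [pvChunks]
  | cons c t ih =>
    intro seen hs
    by_cases h : c = '\n'
    · subst h
      simp only [pvChunks, if_neg (by omega : ¬ seen + 1 = 2),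
        if_neg (by omega : ¬ seen + 1 = 3)]
      simp [ih (seen + 1) (by omega)]
    · simp only [pvChunks, if_neg h]
      simp [ih seen hs]

-- the per-string equivalence
lemma pvBold_eq (s : String) : pvFmtA s = pvBoldThird s := by
  have hnn := pvSplit_ne_nil s.toList
  have hno := pvSplit_no_nl s.toList
  have hlen := pvSplit_length s.toList
  have hjoin := pvJoin_pvSplit s.toList
  simp only [pvFmtA, pvBoldThird, pvSplitOn_eq, pvFoldl_step, pvJoin_nil_flatten, List.nil_append, Nat.zero_add]
  match hx : pvSplit s.toList with
  | [] => exact absurd hx hnn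
  | [p] =>
    rw [hx] at hlen hjoin hno
    have hc : s.toList.count '\n' = 0 := by simpa using hlen.symm
    have hcs : s.toList = p := by simpa [PySem.Chars.join_singleton] using hjoin.symm
    have hp : '\n' ∉ p := hno p (by simp)
    rw [if_neg (by simp)]
    simp only [hc, if_neg (by norm_num : ¬ (0 : Nat) = 2)]
    rw [PySem.Chars.join_singleton]
    have hflat : (pvChunks 0 s.toList).flatten = p := by
      rw [hcs]
      simpa [pvChunks] using pvChunks_nlfree p hp [] 0
    rw [hflat]
  | [p, q] =>
    rw [hx] at hlen hjoin hno
    have hc : s.toList.count '\n' = 1 := by simpa using hlen.symm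
    have hcs : s.toList = p ++ '\n' :: q := by
      rw [PySem.Chars.join_cons_cons, PySem.Chars.join_singleton] at hjoin
      simpa using hjoin.symm
    have hp : '\n' ∉ p := hno p (by simp)
    have hq : '\n' ∉ q := hno q (by simp)
    rw [if_neg (by simp)]
    simp only [hc, if_neg (by norm_num : ¬ (1 : Nat) = 2)]
    rw [PySem.Chars.join_cons_cons, PySem.Chars.join_singleton]
    have hflat : (pvChunks 0 s.toList).flatten = p ++ '\n' :: q := by
      rw [hcs, pvChunks_nlfree p hp]
      simp only [pvChunks]
      norm_num
      simpa [pvChunks] using pvChunks_nlfree q hq [] 1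
    simp [hflat]
  | [p, q, r] =>
    rw [hx] at hlen hjoin hno
    have hc : s.toList.count '\n' = 2 := by simpa using hlen.symm
    have hcs : s.toList = p ++ '\n' :: (q ++ '\n' :: r) := by
      rw [PySem.Chars.join_cons_cons, PySem.Chars.join_cons_cons, PySem.Chars.join_singleton] at hjoin
      simpa using hjoin.symm
    have hp : '\n' ∉ p := hno p (by simp)
    have hq : '\n' ∉ q := hno q (by simp)
    have hr : '\n' ∉ r := hno r (by simp)
    rw [if_pos (by simp)]
    simp only [hc, reduceIte]
    have hbig : (pvChunks 0 s.toList).flatten = p ++ '\n' :: (q ++ '\n' :: ("<strong>".toList ++ r)) := by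
      rw [hcs, pvChunks_nlfree p hp]
      norm_num [pvChunks]
      rw [pvChunks_nlfree q hq]
      norm_num [pvChunks]
      have h2 := pvChunks_nlfree r hr [] 2
      simp [pvChunks] at h2
      simp [h2]
    simp only [List.set]
    rw [PySem.Chars.join_cons_cons, PySem.Chars.join_cons_cons, PySem.Chars.join_singleton]
    simp [hbig]
  | p :: q :: r :: w :: ws =>
    rw [hx] at hlen hjoin hno
    have hc : 3 ≤ s.toList.count '\n' := by simp at hlen; omega
    have hcs : s.toList = p ++ '\n' :: (q ++ '\n' :: (r ++ '\n' :: PySem.Chars.join ['\n'] (w :: ws))) := by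
      rw [PySem.Chars.join_cons_cons, PySem.Chars.join_cons_cons, PySem.Chars.join_cons_cons] at hjoin
      simpa using hjoin.symm
    have hp : '\n' ∉ p := hno p (by simp)
    have hq : '\n' ∉ q := hno q (by simp)
    have hr : '\n' ∉ r := hno r (by simp)
    rw [if_pos (by simp)]
    rw [if_neg (by omega : ¬ List.count '\n' s.toList = 2)]
    have hbig : (pvChunks 0 s.toList).flatten =
        p ++ '\n' :: (q ++ '\n' :: ("<strong>".toList ++ r ++ "</strong>".toList ++ '\n' :: PySem.Chars.join ['\n'] (w :: ws))) := by
      rw [hcs, pvChunks_nlfree p hp]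
      norm_num [pvChunks]
      rw [pvChunks_nlfree q hq]
      norm_num [pvChunks]
      rw [pvChunks_nlfree r hr]
      norm_num [pvChunks]
      simp [pvChunks_high (PySem.Chars.join ['\n'] (w :: ws)) 3 (by norm_num)]
    simp only [List.set]
    rw [PySem.Chars.join_cons_cons, PySem.Chars.join_cons_cons, PySem.Chars.join_cons_cons]
    simp [hbig]

lemma pvFoldl_map (f : String → String) : ∀ (l : List String) (acc : List String),
    l.foldl (fun acc a => acc ++ [f a]) acc = acc ++ l.map f := by
  intro l
  induction l with
  | nil => simp
  | cons x xs ih => intro acc; simp [ih]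

-- ===== VERDICT (by name: the statement is the Claim_ definition above) =====
theorem format_article_title_spec : Claim_equal_format_article_title := by
  intro articles _
  unfold Spec_format_article_title format_article_title format_article_title_alt
  rw [pvFoldl_map pvFmtA articles []]
  simp [List.map_congr_left (fun a _ => pvBold_eq a)]
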